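-- pv_equiv track=rewrite | github.com/Irenim/finishes | IRENIMI.py | interger_array
-- ===== SOURCE A (Python) =====
-- def interger_array(figures): # defining my function with a parameter
--  odd=0
--  even=0  #} declaring  empty variables
--  total=0
--  for numbers in  figures: # looping through number/ reassigning figures to numbers
--     total+=numbers # adding the total numbers in the array together
--     if numbers % 2==0: # checking for even numbers
--      even+=numbers  # adding the even numbers together
--     if numbers % 2==1: # checking for odd numbers
--      odd+=numbers # checking for the total of odd numbers
--  outcome=odd*even-total # checking for the outcome
--  return outcome # returning the outcome to the function for the program to work
-- ===== SOURCE B (Python) =====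
-- def interger_array(figures):
--     figures = list(figures)
--
--     # divide and conquer: returns (sum of even elements, sum of all elements) of seg
--     def go(seg):
--         if len(seg) <= 1:
--             if not seg:
--                 return (0, 0)
--             n = seg[0]
--             return (n if n % 2 == 0 else 0, n)
--         mid = len(seg) // 2
--         e1, t1 = go(seg[:mid])
--         e2, t2 = go(seg[mid:])
--         return (e1 + e2, t1 + t2)
--
--     even, total = go(figures)
--     # for ints n % 2 is 0 or 1, so odd-sum = total - even-sum
--     return (total - even) * even - total
-- ===== Notes on version B (the rewrite author's own statement) =====
-- stated objective: alternative
-- what changed: Replaced the single fused accumulator loop with a recursive divide-and-conquer over list halves that computes only (even_sum, total) and derives the odd sum algebraically as total - even_sum (valid since n % 2 is 0 or 1 for every int).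
import Mathlib
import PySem

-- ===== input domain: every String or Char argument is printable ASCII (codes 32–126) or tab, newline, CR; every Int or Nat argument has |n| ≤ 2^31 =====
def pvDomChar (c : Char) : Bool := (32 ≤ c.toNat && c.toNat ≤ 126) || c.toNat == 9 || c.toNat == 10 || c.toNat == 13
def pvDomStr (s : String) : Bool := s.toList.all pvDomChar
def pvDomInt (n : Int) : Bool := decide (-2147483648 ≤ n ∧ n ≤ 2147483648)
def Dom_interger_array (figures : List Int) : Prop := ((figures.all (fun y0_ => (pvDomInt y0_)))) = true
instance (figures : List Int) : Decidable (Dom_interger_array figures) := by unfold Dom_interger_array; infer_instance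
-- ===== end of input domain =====

-- B replaces A's fused three-accumulator loop with divide-and-conquer over halves
-- computing (even_sum, total) and deriving odd = total - even; objective: alternative.

-- ===== PORT A =====
-- one fused loop over (odd, even, total), then odd*even - total
def interger_array (figures : List Int) : Int :=
  let s := figures.foldl (fun (st : Int × Int × Int) numbers =>
    let (odd, even, total) := st
    let total := total + numbers
    let even := if PySem.Int.mod numbers 2 = 0 then even + numbers else even
    let odd := if PySem.Int.mod numbers 2 = 1 then odd + numbers else odd
    (odd, even, total)) (0, 0, 0)
  s.1 * s.2.1 - s.2.2

-- ===== PORT B =====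
-- go(seg): divide and conquer returning (even sum, total). seg[:mid]/seg[mid:]
-- with 0 ≤ mid ≤ len are exactly List.take/List.drop.
def interger_array_goB (seg : List Int) : Int × Int :=
  if seg.length ≤ 1 then
    match seg with
    | [] => (0, 0)
    | n :: _ => (if PySem.Int.mod n 2 = 0 then n else 0, n)
  else
    let mid := seg.length / 2
    let p1 := interger_array_goB (seg.take mid)
    let p2 := interger_array_goB (seg.drop mid)
    (p1.1 + p2.1, p1.2 + p2.2)
termination_by seg.length
decreasing_by
  · simp only [List.length_take]; omega
  · simp only [List.length_drop]; omega

def interger_array_alt (figures : List Int) : Int :=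
  let p := interger_array_goB figures
  (p.2 - p.1) * p.1 - p.2

-- ===== PRECONDITION & SPEC =====
def Spec_interger_array (figures : List Int) (out : Int) : Prop := out = interger_array_alt figures
instance (figures : List Int) (out : Int) : Decidable (Spec_interger_array figures out) := by unfold Spec_interger_array; infer_instance

-- ===== CLAIM (what is proved, stated in full; the proofs are below) =====
def Claim_equal_interger_array : Prop := ∀ (figures : List Int), Dom_interger_array figures → Spec_interger_array figures (interger_array figures)

-- ===== LEMMAS AND PROOFS =====

-- ===== VERDICT (by name: the statement is the Claim_ definition above) =====
theorem pymod_two (x : Int) : PySem.Int.mod x 2 = x % 2 := by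
  simp [PySem.Int.mod, Int.fmod_eq_emod]

theorem goB_eq (seg : List Int) :
    interger_array_goB seg =
      ((seg.filter (fun n => PySem.Int.mod n 2 = 0)).sum, seg.sum) := by
  fun_induction interger_array_goB seg with
  | case1 h => simp
  | case2 n tail h =>
    have ht : tail = [] := by
      cases tail with
      | nil => rfl
      | cons a as => simp at h
    subst ht
    rcases Int.emod_two_eq_zero_or_one n with h0 | h1
    · have hd : (2:Int) ∣ n := Int.dvd_of_emod_eq_zero h0
      simp [h0, hd]
    · have hd : ¬(2:Int) ∣ n := by omega
      simp [h1, hd]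
  | case3 seg h mid p1 p2 ih2 ih1 =>
    simp only [p1, p2, ih1, ih2, Prod.mk.injEq]
    refine ⟨?_, ?_⟩
    · conv_rhs => rw [← List.take_append_drop mid seg]
      rw [List.filter_append, List.sum_append]
    · conv_rhs => rw [← List.take_append_drop mid seg]
      rw [List.sum_append]

theorem interger_array_fold (figures : List Int) (o e t : Int) :
    figures.foldl (fun (st : Int × Int × Int) numbers =>
      let (odd, even, total) := st
      let total := total + numbers
      let even := if PySem.Int.mod numbers 2 = 0 then even + numbers else even
      let odd := if PySem.Int.mod numbers 2 = 1 then odd + numbers else odd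
      (odd, even, total)) (o, e, t)
    = (o + (figures.filter (fun n => PySem.Int.mod n 2 = 1)).sum,
       e + (figures.filter (fun n => PySem.Int.mod n 2 = 0)).sum,
       t + figures.sum) := by
  induction figures generalizing o e t with
  | nil => simp
  | cons x xs ih =>
    simp only [List.foldl_cons, List.filter_cons, List.sum_cons]
    have h := Int.emod_two_eq_zero_or_one x
    rw [← pymod_two] at h
    rcases h with h | h <;>
      simp only [h,
        show ((0:Int) = 0) = True from by simp,
        show ((0:Int) = 1) = False from by simp,
        show ((1:Int) = 0) = False from by simp,
        show ((1:Int) = 1) = True from by simp,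
        if_true, if_false, decide_true, decide_false, ih] <;>
      refine Prod.ext ?_ (Prod.ext ?_ ?_) <;> simp <;> ring

-- sum of odd-residue elements = total - sum of even-residue elements
theorem odd_filter_sum (figures : List Int) :
    (figures.filter (fun n => PySem.Int.mod n 2 = 1)).sum
      = figures.sum - (figures.filter (fun n => PySem.Int.mod n 2 = 0)).sum := by
  simp only [pymod_two]
  induction figures with
  | nil => simp
  | cons x xs ih =>
    rcases Int.emod_two_eq_zero_or_one x with h0 | h1
    · have hd : (2:Int) ∣ x := Int.dvd_of_emod_eq_zero h0
      simp [List.filter_cons, h0, hd, ih]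
    · have hd : ¬(2:Int) ∣ x := by omega
      simp [List.filter_cons, h1, hd, ih]
      ring

theorem interger_array_spec : Claim_equal_interger_array := by
  intro figures _
  unfold Spec_interger_array interger_array interger_array_alt
  rw [interger_array_fold, goB_eq]
  simp only [zero_add]
  rw [odd_filter_sum]
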